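-- pv_equiv track=rewrite | github.com/sama-shah/romi | data_processing.py | create_generated_labels
-- ===== SOURCE A (Python) =====
-- def create_generated_labels(num_data_points, ovulation_indices, fertility_indices, spike_indices, period_indices):
--     generated_labels = []
--     for i in range(num_data_points):
--         if i in ovulation_indices:
--             generated_labels.append('ovulation')
--         elif i in fertility_indices:
--             generated_labels.append('fertile')
--         elif i in spike_indices:
--             generated_labels.append('luteal')
--         elif i in period_indices:
--             generated_labels.append('period')
--         else:
--             generated_labels.append('follicular')
--     return generated_labels
-- ===== SOURCE B (Python) =====
-- def create_generated_labels(num_data_points, ovulation_indices, fertility_indices, spike_indices, period_indices):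
--     labels = ['follicular'] * num_data_points
--     for label, indices in (('period', period_indices), ('luteal', spike_indices),
--                            ('fertile', fertility_indices), ('ovulation', ovulation_indices)):
--         for idx in indices:
--             if 0 <= idx < num_data_points:
--                 labels[idx] = label
--     return labels
-- ===== Notes on version B (the rewrite author's own statement) =====
-- stated objective: faster
-- what changed: Instead of scanning all four index lists for every position (membership test per point), B pre-fills the whole list with 'follicular' and then overwrites positions directly, iterating the four index lists once each in reverse priority order so later writes clobber lower-priority labels.
import Mathlib
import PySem

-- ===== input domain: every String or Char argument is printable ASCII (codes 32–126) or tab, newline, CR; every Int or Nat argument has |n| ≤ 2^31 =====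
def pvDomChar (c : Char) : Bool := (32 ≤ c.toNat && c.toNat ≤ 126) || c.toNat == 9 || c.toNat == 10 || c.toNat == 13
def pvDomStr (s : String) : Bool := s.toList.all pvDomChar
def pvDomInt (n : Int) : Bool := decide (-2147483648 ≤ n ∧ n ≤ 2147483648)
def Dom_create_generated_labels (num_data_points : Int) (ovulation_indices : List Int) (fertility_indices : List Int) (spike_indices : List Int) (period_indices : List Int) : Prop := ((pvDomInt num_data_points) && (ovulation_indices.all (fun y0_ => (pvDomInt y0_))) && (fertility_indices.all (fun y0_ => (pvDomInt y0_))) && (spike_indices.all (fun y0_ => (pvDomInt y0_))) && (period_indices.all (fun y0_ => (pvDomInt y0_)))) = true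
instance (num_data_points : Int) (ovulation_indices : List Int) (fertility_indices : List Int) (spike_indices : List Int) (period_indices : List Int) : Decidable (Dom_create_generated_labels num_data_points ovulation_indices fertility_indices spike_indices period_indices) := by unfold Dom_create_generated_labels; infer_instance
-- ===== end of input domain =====

-- B replaces A's per-point membership scan of all four lists by a pre-filled list that is
-- overwritten in reverse priority order, one pass per index list (objective: faster).

-- ===== PORT A =====
-- literal port of A: for i in range(n), append the label chosen by the if/elif membership chain
def create_generated_labels (num_data_points : Int) (ovulation_indices : List Int) (fertility_indices : List Int) (spike_indices : List Int) (period_indices : List Int) : List String :=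
  (PySem.List.pyRange 0 num_data_points 1).foldl
    (fun generated_labels i =>
      if i ∈ ovulation_indices then generated_labels ++ ["ovulation"]
      else if i ∈ fertility_indices then generated_labels ++ ["fertile"]
      else if i ∈ spike_indices then generated_labels ++ ["luteal"]
      else if i ∈ period_indices then generated_labels ++ ["period"]
      else generated_labels ++ ["follicular"]) []

-- ===== PORT B =====
-- labels[idx] = label, guarded by 0 <= idx < num_data_points
def pvSetLabel (n : Int) (l : String) (labels : List String) (idx : Int) : List String :=
  if 0 ≤ idx ∧ idx < n then labels.set idx.toNat l else labels

def create_generated_labels_alt (num_data_points : Int) (ovulation_indices : List Int) (fertility_indices : List Int) (spike_indices : List Int) (period_indices : List Int) : List String :=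
  let labels := List.replicate num_data_points.toNat "follicular"
  let labels := period_indices.foldl (pvSetLabel num_data_points "period") labels
  let labels := spike_indices.foldl (pvSetLabel num_data_points "luteal") labels
  let labels := fertility_indices.foldl (pvSetLabel num_data_points "fertile") labels
  ovulation_indices.foldl (pvSetLabel num_data_points "ovulation") labels

-- ===== PRECONDITION & SPEC =====
def Spec_create_generated_labels (num_data_points : Int) (ovulation_indices : List Int) (fertility_indices : List Int) (spike_indices : List Int) (period_indices : List Int) (out : List String) : Prop := out = create_generated_labels_alt num_data_points ovulation_indices fertility_indices spike_indices period_indices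
instance (num_data_points : Int) (ovulation_indices : List Int) (fertility_indices : List Int) (spike_indices : List Int) (period_indices : List Int) (out : List String) : Decidable (Spec_create_generated_labels num_data_points ovulation_indices fertility_indices spike_indices period_indices out) := by unfold Spec_create_generated_labels; infer_instance

-- ===== CLAIM (what is proved, stated in full; the proofs are below) =====
def Claim_equal_create_generated_labels : Prop := ∀ (num_data_points : Int) (ovulation_indices : List Int) (fertility_indices : List Int) (spike_indices : List Int) (period_indices : List Int), Dom_create_generated_labels num_data_points ovulation_indices fertility_indices spike_indices period_indices → Spec_create_generated_labels num_data_points ovulation_indices fertility_indices spike_indices period_indices (create_generated_labels num_data_points ovulation_indices fertility_indices spike_indices period_indices)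

-- ===== LEMMAS AND PROOFS =====

theorem length_foldl_pvSetLabel (n : Int) (l : String) (xs : List Int) (acc : List String) :
    (xs.foldl (pvSetLabel n l) acc).length = acc.length := by
  induction xs generalizing acc with
  | nil => rfl
  | cons x xs ih =>
      simp only [List.foldl_cons, ih]
      unfold pvSetLabel
      split <;> simp

theorem getElem?_foldl_pvSetLabel (n : Int) (l : String) (xs : List Int) (acc : List String)
    (i : Nat) (hlen : acc.length = n.toNat) (hi : i < n.toNat) :
    (xs.foldl (pvSetLabel n l) acc)[i]? = if (i : Int) ∈ xs then some l else acc[i]? := by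
  induction xs generalizing acc with
  | nil => simp
  | cons x xs ih =>
      simp only [List.foldl_cons]
      have hlen' : (pvSetLabel n l acc x).length = n.toNat := by
        unfold pvSetLabel; split <;> simp [hlen]
      rw [ih (pvSetLabel n l acc x) hlen']
      have hin : (i : Int) < n := by omega
      by_cases hmem : (i : Int) ∈ xs
      · simp [hmem]
      · simp only [List.mem_cons, hmem, or_false]
        unfold pvSetLabel
        by_cases heq : (i : Int) = x
        · have hg : 0 ≤ x ∧ x < n := by
            rw [← heq]; exact ⟨Int.natCast_nonneg i, hin⟩
          have hx : x.toNat = i := by rw [← heq]; simp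
          simp [hg, hx, hlen, hi, heq]
        · by_cases hg : 0 ≤ x ∧ x < n
          · have hne : x.toNat ≠ i := by
              intro hc
              exact heq (by omega)
            simp [hg, hne, heq]
          · simp [hg, heq]

theorem foldl_append_singleton_map (f : Int → String) (xs : List Int) (acc : List String) :
    xs.foldl (fun a i => a ++ [f i]) acc = acc ++ xs.map f := by
  induction xs generalizing acc with
  | nil => simp
  | cons x xs ih => simp [ih]

theorem create_generated_labels_eq_map (num_data_points : Int) (ovulation_indices : List Int)
    (fertility_indices : List Int) (spike_indices : List Int) (period_indices : List Int) :
    create_generated_labels num_data_points ovulation_indices fertility_indices spike_indices period_indices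
      = (PySem.List.pyRange 0 num_data_points 1).map
          (fun i =>
            if i ∈ ovulation_indices then "ovulation"
            else if i ∈ fertility_indices then "fertile"
            else if i ∈ spike_indices then "luteal"
            else if i ∈ period_indices then "period"
            else "follicular") := by
  unfold create_generated_labels
  have h := foldl_append_singleton_map
      (fun i =>
        if i ∈ ovulation_indices then "ovulation"
        else if i ∈ fertility_indices then "fertile"
        else if i ∈ spike_indices then "luteal"
        else if i ∈ period_indices then "period"
        else "follicular")
      (PySem.List.pyRange 0 num_data_points 1) []
  simp only [List.nil_append] at h
  rw [← h]
  congr 1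
  funext a i
  split_ifs <;> rfl

-- ===== VERDICT (by name: the statement is the Claim_ definition above) =====
theorem create_generated_labels_spec : Claim_equal_create_generated_labels := by
  intro n ov fe sp pe _dom
  unfold Spec_create_generated_labels
  rw [create_generated_labels_eq_map]
  unfold create_generated_labels_alt
  simp only []
  have hlen0 : (List.replicate n.toNat "follicular").length = n.toNat := by simp
  have hlen1 := length_foldl_pvSetLabel n "period" pe (List.replicate n.toNat "follicular")
  have hlen2 := length_foldl_pvSetLabel n "luteal" sp
      (pe.foldl (pvSetLabel n "period") (List.replicate n.toNat "follicular"))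
  have hlen3 := length_foldl_pvSetLabel n "fertile" fe
      (sp.foldl (pvSetLabel n "luteal") (pe.foldl (pvSetLabel n "period") (List.replicate n.toNat "follicular")))
  apply List.ext_getElem?
  intro i
  by_cases hi : i < n.toNat
  · rw [getElem?_foldl_pvSetLabel n "ovulation" ov _ i (by omega) hi,
        getElem?_foldl_pvSetLabel n "fertile" fe _ i (by omega) hi,
        getElem?_foldl_pvSetLabel n "luteal" sp _ i (by omega) hi,
        getElem?_foldl_pvSetLabel n "period" pe _ i (by omega) hi]
    rw [List.getElem?_map, PySem.List.getElem?_pyRange_one]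
    have hi' : i < ((n : Int) - 0).toNat := by omega
    simp only [hi', if_true, zero_add, Option.map_some]
    rw [List.getElem?_replicate]
    simp only [hi, if_true]
    split_ifs <;> rfl
  · rw [List.getElem?_map, PySem.List.getElem?_pyRange_one]
    have hi' : ¬ i < ((n : Int) - 0).toNat := by omega
    rw [if_neg hi']
    simp only [Option.map_none]
    symm
    apply List.getElem?_eq_none
    simp only [length_foldl_pvSetLabel, List.length_replicate]
    omega
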